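-- pv_equiv track=rewrite | github.com/mfrederico/halfbaked | lfm-code.py | prune_failed_exchanges
-- ===== SOURCE A (Python) =====
-- def prune_failed_exchanges(messages: list) -> list:
--     """Remove consecutive failed tool exchanges from history to prevent degeneration.
--
--     Keeps the system prompt, user messages, successful tool results,
--     and the last failed exchange (so the model knows what just happened).
--     """
--     if len(messages) < 6:
--         return messages
--
--     pruned = [messages[0]]  # system prompt
--     i = 1
--     error_streak = 0
--
--     while i < len(messages):
--         msg = messages[i]
--         role = msg.get("role", "")
--
--         if role == "tool":
--             content = msg.get("content", "")
--             if "Error:" in content or "CORRECTION:" in content: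
--                 error_streak += 1
--                 # Keep only the last 2 error exchanges
--                 if error_streak > 2 and i < len(messages) - 2:
--                     # Skip this error and its preceding assistant message
--                     if pruned and pruned[-1].get("role") == "assistant":
--                         pruned.pop()
--                     i += 1
--                     continue
--             else:
--                 error_streak = 0
--
--         pruned.append(msg)
--         i += 1
--
--     return pruned
-- ===== SOURCE B (Python) =====
-- def prune_failed_exchanges(messages: list) -> list:
--     """Two-pass rewrite: first mark droppable error-tool messages via the
--     streak scan, then replay a keep-stack that also removes the preceding
--     assistant message of each dropped error."""
--     n = len(messages)
--     if n < 6: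
--         return messages
--
--     drop = [False] * n
--     streak = 0
--     for i in range(1, n):
--         msg = messages[i]
--         if msg.get("role", "") == "tool":
--             content = msg.get("content", "")
--             if "Error:" in content or "CORRECTION:" in content:
--                 streak += 1
--                 drop[i] = streak > 2 and i < n - 2
--             else:
--                 streak = 0
--
--     kept = [messages[0]]
--     for i in range(1, n):
--         if drop[i]:
--             if kept and kept[-1].get("role") == "assistant":
--                 kept.pop()
--         else:
--             kept.append(messages[i])
--     return kept
-- ===== Notes on version B (the rewrite author's own statement) =====
-- stated objective: alternative
-- what changed: A's single fused while-loop (inline skip/pop with continue) is split into two passes: a streak scan that marks droppable error-tool messages, then a keep-stack replay that drops them and their preceding assistant messages.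
import Mathlib
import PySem

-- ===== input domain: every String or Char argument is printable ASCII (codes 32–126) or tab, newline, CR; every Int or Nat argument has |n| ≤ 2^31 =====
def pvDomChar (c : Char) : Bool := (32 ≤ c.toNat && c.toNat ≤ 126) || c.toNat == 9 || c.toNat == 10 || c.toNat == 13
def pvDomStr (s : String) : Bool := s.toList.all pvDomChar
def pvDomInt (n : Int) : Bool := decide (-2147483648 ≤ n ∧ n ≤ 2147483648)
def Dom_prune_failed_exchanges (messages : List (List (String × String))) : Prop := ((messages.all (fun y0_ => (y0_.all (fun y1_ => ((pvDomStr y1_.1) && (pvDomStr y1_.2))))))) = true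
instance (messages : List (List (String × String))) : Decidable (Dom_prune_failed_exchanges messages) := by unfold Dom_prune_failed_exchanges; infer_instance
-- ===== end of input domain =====

-- B re-implements A as two passes (mark droppable errors, then replay a keep-stack); same return value, objective: alternative decomposition.

-- ===== PORT A =====
-- msg.get(k, d) on the association list (first match, default d)
def pvGetD (m : List (String × String)) (k d : String) : String :=
  (m.lookup k).getD d

-- A's while loop; `pruned` is kept in REVERSED order (append = cons, pop = tail), reversed at the end.
def pruneA_loop (n : Nat) : List (List (String × String)) → Nat → Nat → List (List (String × String)) → List (List (String × String))
  | [], _, _, pruned => pruned.reverse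
  | msg :: rest, i, streak, pruned =>
    let role := pvGetD msg "role" ""
    if role == "tool" then
      let content := pvGetD msg "content" ""
      if PySem.Str.isIn "Error:" content || PySem.Str.isIn "CORRECTION:" content then
        let streak' := streak + 1
        if decide (2 < streak') && decide (i < n - 2) then
          -- skip this error and its preceding assistant message
          let pruned' :=
            match pruned with
            | [] => []
            | p :: ps => if (p.lookup "role") == some "assistant" then ps else p :: ps
          pruneA_loop n rest (i + 1) streak' pruned'
        else
          pruneA_loop n rest (i + 1) streak' (msg :: pruned)
      else
        pruneA_loop n rest (i + 1) 0 (msg :: pruned)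
    else
      pruneA_loop n rest (i + 1) streak (msg :: pruned)

def prune_failed_exchanges (messages : List (List (String × String))) : List (List (String × String)) :=
  if messages.length < 6 then messages
  else
    match messages with
    | [] => []   -- unreachable: length ≥ 6
    | m0 :: rest => pruneA_loop messages.length rest 1 0 [m0]

-- ===== PORT B =====
-- Pass 1: one Bool per message of the tail — is it a droppable error-tool message?
def pruneB_drops (n : Nat) : List (List (String × String)) → Nat → Nat → List Bool
  | [], _, _ => []
  | msg :: rest, i, streak =>
    if pvGetD msg "role" "" == "tool" then
      let content := pvGetD msg "content" ""
      if PySem.Str.isIn "Error:" content || PySem.Str.isIn "CORRECTION:" content then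
        let streak' := streak + 1
        (decide (2 < streak') && decide (i < n - 2)) :: pruneB_drops n rest (i + 1) streak'
      else
        false :: pruneB_drops n rest (i + 1) 0
    else
      false :: pruneB_drops n rest (i + 1) streak

-- Pass 2: replay a keep-stack (REVERSED; append = cons, pop = tail), reversed at the end.
def pruneB_replay : List (List (String × String) × Bool) → List (List (String × String)) → List (List (String × String))
  | [], kept => kept.reverse
  | (msg, d) :: rest, kept =>
    if d then
      pruneB_replay rest
        (match kept with
         | [] => []
         | p :: ps => if (p.lookup "role") == some "assistant" then ps else p :: ps)
    else
      pruneB_replay rest (msg :: kept)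

def prune_failed_exchanges_alt (messages : List (List (String × String))) : List (List (String × String)) :=
  if messages.length < 6 then messages
  else
    match messages with
    | [] => []
    | m0 :: rest => pruneB_replay (rest.zip (pruneB_drops messages.length rest 1 0)) [m0]

-- ===== PRECONDITION & SPEC =====
def Spec_prune_failed_exchanges (messages : List (List (String × String))) (out : List (List (String × String))) : Prop := out = prune_failed_exchanges_alt messages
instance (messages : List (List (String × String))) (out : List (List (String × String))) : Decidable (Spec_prune_failed_exchanges messages out) := by unfold Spec_prune_failed_exchanges; infer_instance

-- ===== CLAIM (what is proved, stated in full; the proofs are below) =====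
def Claim_equal_prune_failed_exchanges : Prop := ∀ (messages : List (List (String × String))), Dom_prune_failed_exchanges messages → Spec_prune_failed_exchanges messages (prune_failed_exchanges messages)

-- ===== LEMMAS AND PROOFS =====

-- A's fused loop equals B's mark-then-replay on every suffix and state.
theorem pruneA_loop_eq_replay (n : Nat) (rest : List (List (String × String))) :
    ∀ (i streak : Nat) (kept : List (List (String × String))),
    pruneA_loop n rest i streak kept = pruneB_replay (rest.zip (pruneB_drops n rest i streak)) kept := by
  induction rest with
  | nil => intro i streak kept; simp [pruneA_loop, pruneB_drops, pruneB_replay]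
  | cons msg rest ih =>
    intro i streak kept
    simp only [pruneA_loop, pruneB_drops]
    by_cases hrole : pvGetD msg "role" "" == "tool"
    · simp only [hrole, if_true]
      by_cases herr : (PySem.Str.isIn "Error:" (pvGetD msg "content" "") ||
          PySem.Str.isIn "CORRECTION:" (pvGetD msg "content" "")) = true
      · simp only [herr, if_true, List.zip_cons_cons, pruneB_replay]
        by_cases hc : (decide (2 < streak + 1) && decide (i < n - 2)) = true
        · simp only [hc, if_true, ih]
        · simp only [Bool.not_eq_true] at hc
          simp only [hc, if_false, Bool.false_eq_true, ih]
      · simp only [Bool.not_eq_true] at herr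
        simp only [herr, if_false, Bool.false_eq_true, List.zip_cons_cons, pruneB_replay, ih]
    · simp only [Bool.not_eq_true] at hrole
      simp only [hrole, if_false, Bool.false_eq_true, List.zip_cons_cons, pruneB_replay, ih]

-- ===== VERDICT (by name: the statement is the Claim_ definition above) =====
theorem prune_failed_exchanges_spec : Claim_equal_prune_failed_exchanges := by
  intro messages _
  unfold Spec_prune_failed_exchanges prune_failed_exchanges prune_failed_exchanges_alt
  by_cases h : messages.length < 6
  · simp [h]
  · simp only [h, if_false]
    cases messages with
    | nil => rfl
    | cons m0 rest => exact pruneA_loop_eq_replay _ rest 1 0 [m0]
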